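-- pv_equiv track=rewrite | github.com/ttzytt/PyAutoGrade | tests/Block 4/tested_code/1460/file_reading.py | all_vowels_counter
-- ===== SOURCE A (Python) =====
-- def all_vowels_counter(read_file):
--     count = 0
--     for line in read_file:
--         words = line.split()
--         for word in words:
--
--
--
--             if (('e' in word or 'E' in word) and
--                 ('a' in word or 'A' in word) and
--                 ('i' in word or 'I' in word) and
--                 ('o' in word or 'O' in word) and
--                 ('u' in word or 'U' in word)):
--                 count += 1
--     return count
-- ===== SOURCE B (Python) =====
-- _BIT = {'a': 1, 'e': 2, 'i': 4, 'o': 8, 'u': 16}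
--
-- def all_vowels_counter(read_file):
--     # streaming character automaton: no split(), no per-word substring scans;
--     # a 5-bit mask of vowels seen in the current word, flushed at whitespace.
--     count = 0
--     for line in read_file:
--         mask = 0
--         for ch in line:
--             if ch.isspace():
--                 if mask == 31:
--                     count += 1
--                 mask = 0
--             else:
--                 mask |= _BIT.get(ch.lower(), 0)
--         if mask == 31:
--             count += 1
--     return count
-- ===== Notes on version B (the rewrite author's own statement) =====
-- stated objective: alternative
-- what changed: Replaces split() plus ten per-word substring scans by a single character-level streaming automaton: one pass per line maintaining a 5-bit vowel mask for the current word, flushed (and counted when the mask is full) at each whitespace boundary and at end of line.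
import Mathlib
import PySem

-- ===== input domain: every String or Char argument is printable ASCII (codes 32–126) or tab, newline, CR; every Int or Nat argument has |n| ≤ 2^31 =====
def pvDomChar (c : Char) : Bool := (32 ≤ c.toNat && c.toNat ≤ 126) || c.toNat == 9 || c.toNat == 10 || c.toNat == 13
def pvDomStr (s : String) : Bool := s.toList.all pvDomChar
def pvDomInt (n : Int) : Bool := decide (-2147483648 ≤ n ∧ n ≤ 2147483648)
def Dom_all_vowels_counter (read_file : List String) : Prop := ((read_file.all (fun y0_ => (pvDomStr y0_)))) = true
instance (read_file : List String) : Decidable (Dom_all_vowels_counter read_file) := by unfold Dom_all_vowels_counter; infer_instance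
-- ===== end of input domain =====

-- B replaces split() plus ten per-word substring scans by a single character-level
-- streaming automaton: one pass per line with a 5-bit vowel mask for the current word,
-- flushed at each whitespace boundary and at end of line (alternative; return value only).

-- ===== PORT A =====
def all_vowels_counter (read_file : List String) : Int :=
  read_file.foldl (fun count line =>
    let words := PySem.Str.split₀ line
    words.foldl (fun count word =>
      if ((PySem.Str.isIn "e" word || PySem.Str.isIn "E" word) &&
          (PySem.Str.isIn "a" word || PySem.Str.isIn "A" word) &&
          (PySem.Str.isIn "i" word || PySem.Str.isIn "I" word) &&
          (PySem.Str.isIn "o" word || PySem.Str.isIn "O" word) &&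
          (PySem.Str.isIn "u" word || PySem.Str.isIn "U" word)) then
        count + 1
      else count) count) 0

-- ===== PORT B =====
-- _BIT = {'a': 1, 'e': 2, 'i': 4, 'o': 8, 'u': 16}
def pvBIT : PySem.Dict Char Nat :=
  ((((PySem.Dict.empty.insert 'a' 1).insert 'e' 2).insert 'i' 4).insert 'o' 8).insert 'u' 16

-- _BIT.get(ch.lower(), 0)
def pvBitOf (ch : Char) : Nat := PySem.Dict.getD pvBIT (PySem.Chars.lowerChar ch) 0

-- the inner per-character automaton step: state = (count, mask)
def pvStep (st : Int × Nat) (ch : Char) : Int × Nat :=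
  if PySem.Chars.isspace ch then
    (if st.2 == 31 then st.1 + 1 else st.1, 0)
  else
    (st.1, st.2 ||| pvBitOf ch)

-- the per-line loop: scan the characters, then the end-of-line flush
def pvLineCount (count : Int) (line : String) : Int :=
  let st := line.toList.foldl pvStep (count, 0)
  if st.2 == 31 then st.1 + 1 else st.1

def all_vowels_counter_alt (read_file : List String) : Int :=
  read_file.foldl pvLineCount 0

-- ===== PRECONDITION & SPEC =====
def Spec_all_vowels_counter (read_file : List String) (out : Int) : Prop := out = all_vowels_counter_alt read_file
instance (read_file : List String) (out : Int) : Decidable (Spec_all_vowels_counter read_file out) := by unfold Spec_all_vowels_counter; infer_instance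

-- ===== CLAIM (what is proved, stated in full; the proofs are below) =====
def Claim_equal_all_vowels_counter : Prop := ∀ (read_file : List String), Dom_all_vowels_counter read_file → Spec_all_vowels_counter read_file (all_vowels_counter read_file)

-- ===== LEMMAS AND PROOFS =====

-- the vowel mask of a char list
def pvMaskOf (w : List Char) : Nat := w.foldl (fun m c => m ||| pvBitOf c) 0

-- B's per-word predicate, and A's per-word test
def pvPB (w : List Char) : Bool := pvMaskOf w == 31

def pvCondA (word : String) : Bool :=
  ((PySem.Str.isIn "e" word || PySem.Str.isIn "E" word) &&
   (PySem.Str.isIn "a" word || PySem.Str.isIn "A" word) &&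
   (PySem.Str.isIn "i" word || PySem.Str.isIn "I" word) &&
   (PySem.Str.isIn "o" word || PySem.Str.isIn "O" word) &&
   (PySem.Str.isIn "u" word || PySem.Str.isIn "U" word))

theorem char_eq_of_toNat (a b : Char) (h : a.toNat = b.toNat) : a = b :=
  Char.ext (UInt32.toNat_inj.mp h)

theorem char_le_iff (a b : Char) : a ≤ b ↔ a.toNat ≤ b.toNat := Iff.rfl

theorem toNat_ofNat_lt (n : Nat) (h : n < 0xd800) : (Char.ofNat n).toNat = n := by
  have hv : n.isValidChar := Or.inl h
  simp only [Char.ofNat, hv, dite_true, Char.ofNatAux]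
  rfl

-- lower() sends exactly the lowercase vowel and its uppercase form to the lowercase vowel
theorem lowerChar_eq_vowel (v V : Char) (hv : v.toNat = V.toNat + 32) (hV : 65 ≤ V.toNat)
    (hV2 : V.toNat ≤ 90) (c : Char) :
    PySem.Chars.lowerChar c = v ↔ (c = v ∨ c = V) := by
  unfold PySem.Chars.lowerChar PySem.Chars.isupper
  have hA : 'A'.toNat = 65 := rfl
  have hZ : 'Z'.toNat = 90 := rfl
  constructor
  · intro h
    split at h
    · rename_i hu
      simp only [Bool.and_eq_true, decide_eq_true_eq, char_le_iff] at hu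
      right
      apply char_eq_of_toNat
      have h1 : (Char.ofNat (c.toNat + 32)).toNat = c.toNat + 32 :=
        toNat_ofNat_lt _ (by omega)
      have h2 := congrArg Char.toNat h
      rw [h1, hv] at h2
      omega
    · left; exact h
  · rintro (rfl | rfl)
    · rw [if_neg]
      simp only [Bool.and_eq_true, decide_eq_true_eq, char_le_iff, not_and]
      intro h1 h2
      omega
    · rw [if_pos]
      · apply char_eq_of_toNat
        rw [toNat_ofNat_lt _ (by omega)]
        omega
      · simp only [Bool.and_eq_true, decide_eq_true_eq, char_le_iff]
        omega

theorem str_isIn_single (c : Char) (w : String) :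
    PySem.Str.isIn (String.ofList [c]) w = true ↔ c ∈ w.toList := by
  rw [PySem.Str.isIn_iff_infix]
  simpa using List.singleton_infix_iff c w.toList

-- pvBitOf as nested ifs on the lowered char
theorem pvBitOf_eq (c : Char) :
    pvBitOf c =
      (if PySem.Chars.lowerChar c = 'u' then 16
       else if PySem.Chars.lowerChar c = 'o' then 8
       else if PySem.Chars.lowerChar c = 'i' then 4
       else if PySem.Chars.lowerChar c = 'e' then 2
       else if PySem.Chars.lowerChar c = 'a' then 1
       else 0) := by
  unfold pvBitOf pvBIT
  simp [PySem.Dict.getD_insert, PySem.Dict.getD_empty]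

theorem pvBitOf_lt (c : Char) : pvBitOf c < 32 := by
  rw [pvBitOf_eq]; split_ifs <;> omega

theorem pvBitOf_testBit (c : Char) (i : Nat) (hi : i < 5) :
    (pvBitOf c).testBit i =
      decide (PySem.Chars.lowerChar c = (['a', 'e', 'i', 'o', 'u'].getD i 'a')) := by
  rw [pvBitOf_eq]
  interval_cases i <;> split_ifs <;> simp_all <;> decide

-- testBit of the running or-fold
theorem foldl_or_testBit (w : List Char) (m : Nat) (i : Nat) :
    (w.foldl (fun m c => m ||| pvBitOf c) m).testBit i
      = (m.testBit i || w.any (fun c => (pvBitOf c).testBit i)) := by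
  induction w generalizing m with
  | nil => simp
  | cons c rest ih =>
    simp only [List.foldl_cons, List.any_cons, ih, Nat.testBit_or, Bool.or_assoc]

theorem foldl_or_lt (w : List Char) (m : Nat) (hm : m < 32) :
    w.foldl (fun m c => m ||| pvBitOf c) m < 32 := by
  induction w generalizing m with
  | nil => exact hm
  | cons c rest ih =>
    exact ih _ (Nat.or_lt_two_pow (n := 5) hm (pvBitOf_lt c))

-- one vowel's bit of the mask ↔ either case of the vowel occurs in the word
theorem mask_testBit_iff (w : List Char) (i : Nat) (hi : i < 5)
    (v V : Char) (hv : v.toNat = V.toNat + 32) (hV : 65 ≤ V.toNat) (hV2 : V.toNat ≤ 90)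
    (hvi : (['a', 'e', 'i', 'o', 'u'].getD i 'a') = v) :
    (pvMaskOf w).testBit i = true ↔ (v ∈ w ∨ V ∈ w) := by
  unfold pvMaskOf
  rw [foldl_or_testBit]
  simp only [Nat.zero_testBit, Bool.false_or, List.any_eq_true]
  constructor
  · rintro ⟨c, hc, hb⟩
    rw [pvBitOf_testBit c i hi, hvi, decide_eq_true_eq] at hb
    rcases (lowerChar_eq_vowel v V hv hV hV2 c).mp hb with rfl | rfl
    · exact Or.inl hc
    · exact Or.inr hc
  · rintro (h | h)
    · exact ⟨v, h, by
        rw [pvBitOf_testBit v i hi, hvi, decide_eq_true_eq]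
        exact (lowerChar_eq_vowel v V hv hV hV2 v).mpr (Or.inl rfl)⟩
    · exact ⟨V, h, by
        rw [pvBitOf_testBit V i hi, hvi, decide_eq_true_eq]
        exact (lowerChar_eq_vowel v V hv hV hV2 V).mpr (Or.inr rfl)⟩

-- the per-word tests of A and B agree
theorem pvCondA_eq_pvPB (w : String) : pvCondA w = pvPB w.toList := by
  have hlt : pvMaskOf w.toList < 32 := foldl_or_lt _ 0 (by omega)
  have ha := mask_testBit_iff w.toList 0 (by omega) 'a' 'A' rfl (by decide) (by decide) rfl
  have he := mask_testBit_iff w.toList 1 (by omega) 'e' 'E' rfl (by decide) (by decide) rfl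
  have hi := mask_testBit_iff w.toList 2 (by omega) 'i' 'I' rfl (by decide) (by decide) rfl
  have ho := mask_testBit_iff w.toList 3 (by omega) 'o' 'O' rfl (by decide) (by decide) rfl
  have hu := mask_testBit_iff w.toList 4 (by omega) 'u' 'U' rfl (by decide) (by decide) rfl
  have hmem : ∀ (c : Char), c ∈ w.toList ↔ PySem.Str.isIn (String.ofList [c]) w = true :=
    fun c => (str_isIn_single c w).symm
  rcases hb : pvPB w.toList with _ | _
  · -- B says no: some bit is missing, so some conjunct of A is false
    unfold pvPB at hb
    rw [beq_eq_false_iff_ne] at hb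
    rw [Bool.eq_false_iff]
    intro hA
    apply hb
    unfold pvCondA at hA
    simp only [Bool.and_eq_true, Bool.or_eq_true] at hA
    obtain ⟨⟨⟨⟨hE, hA'⟩, hI⟩, hO⟩, hU⟩ := hA
    apply Nat.eq_of_testBit_eq
    intro i
    rcases Nat.lt_or_ge i 5 with h5 | h5
    · interval_cases i
      · rw [ha.mpr (by rw [hmem, hmem]; exact hA')]; decide
      · rw [he.mpr (by rw [hmem, hmem]; exact hE)]; decide
      · rw [hi.mpr (by rw [hmem, hmem]; exact hI)]; decide
      · rw [ho.mpr (by rw [hmem, hmem]; exact hO)]; decide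
      · rw [hu.mpr (by rw [hmem, hmem]; exact hU)]; decide
    · have hpow : (32 : Nat) ≤ 2 ^ i := by
        calc (32 : Nat) = 2 ^ 5 := by norm_num
          _ ≤ 2 ^ i := Nat.pow_le_pow_right (by omega) h5
      have h1 : (pvMaskOf w.toList).testBit i = false :=
        Nat.testBit_eq_false_of_lt (lt_of_lt_of_le hlt hpow)
      have h2 : (31 : Nat).testBit i = false :=
        Nat.testBit_eq_false_of_lt (lt_of_lt_of_le (by omega) hpow)
      rw [h1, h2]
  · -- B says yes: every bit is set, so every conjunct of A holds
    unfold pvPB at hb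
    rw [beq_iff_eq] at hb
    unfold pvCondA
    simp only [Bool.and_eq_true, Bool.or_eq_true]
    have bit : ∀ i, i < 5 → (pvMaskOf w.toList).testBit i = true := by
      intro i h5; rw [hb]; interval_cases i <;> decide
    refine ⟨⟨⟨⟨?_, ?_⟩, ?_⟩, ?_⟩, ?_⟩
    · rcases he.mp (bit 1 (by omega)) with h | h
      · exact Or.inl ((hmem 'e').mp h)
      · exact Or.inr ((hmem 'E').mp h)
    · rcases ha.mp (bit 0 (by omega)) with h | h
      · exact Or.inl ((hmem 'a').mp h)
      · exact Or.inr ((hmem 'A').mp h)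
    · rcases hi.mp (bit 2 (by omega)) with h | h
      · exact Or.inl ((hmem 'i').mp h)
      · exact Or.inr ((hmem 'I').mp h)
    · rcases ho.mp (bit 3 (by omega)) with h | h
      · exact Or.inl ((hmem 'o').mp h)
      · exact Or.inr ((hmem 'O').mp h)
    · rcases hu.mp (bit 4 (by omega)) with h | h
      · exact Or.inl ((hmem 'u').mp h)
      · exact Or.inr ((hmem 'U').mp h)

-- split₀.go's accumulator prepends (reversed)
theorem split₀_go_acc (cs : List Char) :
    ∀ (cur : List Char) (acc : List (List Char)), PySem.Chars.split₀.go cs cur acc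
      = acc.reverse ++ PySem.Chars.split₀.go cs cur [] := by
  induction cs with
  | nil =>
    intro cur acc
    simp only [PySem.Chars.split₀.go]
    split_ifs <;> simp
  | cons c rest ih =>
    intro cur acc
    simp only [PySem.Chars.split₀.go]
    split_ifs with h1 h2
    · exact ih [] acc
    · rw [ih [] (cur.reverse :: acc), ih [] [cur.reverse]]
      simp
    · exact ih (c :: cur) acc

-- the automaton's invariant: scanning cs with the mask of the in-progress word cur
-- counts, after the flush, exactly the all-vowel words of split₀.go cs cur []
theorem scan_eq (cs : List Char) :
    ∀ (cur : List Char) (count : Int),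
      (if (cs.foldl pvStep (count, pvMaskOf cur.reverse)).2 == 31
       then (cs.foldl pvStep (count, pvMaskOf cur.reverse)).1 + 1
       else (cs.foldl pvStep (count, pvMaskOf cur.reverse)).1)
      = count + (((PySem.Chars.split₀.go cs cur []).countP pvPB : Nat) : Int) := by
  induction cs with
  | nil =>
    intro cur count
    simp only [List.foldl_nil, PySem.Chars.split₀.go]
    by_cases hc : cur = []
    · subst hc
      simp [pvMaskOf]
    · have hne : cur.isEmpty = false := by simpa using hc
      rcases hp : ((pvMaskOf cur.reverse == 31) : Bool) with _ | _ <;>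
        simp [hne, hp, pvPB]
  | cons c rest ih =>
    intro cur count
    by_cases hs : PySem.Chars.isspace c = true
    · have hgo : PySem.Chars.split₀.go (c :: rest) cur [] =
          if cur.isEmpty then PySem.Chars.split₀.go rest [] []
          else PySem.Chars.split₀.go rest [] [cur.reverse] := by
        simp only [PySem.Chars.split₀.go, hs, if_true]
      have hstep : pvStep (count, pvMaskOf cur.reverse) c =
          ((if ((pvMaskOf cur.reverse == 31) : Bool) then count + 1 else count), 0) := by
        simp [pvStep, hs]
      by_cases hc : cur = []
      · subst hc
        simp only [List.isEmpty_nil, if_true] at hgo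
        rw [show pvMaskOf ([] : List Char).reverse = 0 from rfl,
            show (((0 : Nat) == 31) : Bool) = false from by decide] at hstep
        simp only [Bool.false_eq_true, if_false] at hstep
        rw [show pvMaskOf ([] : List Char).reverse = 0 from rfl, List.foldl_cons, hstep, hgo]
        have ih0 := ih [] count
        rw [show pvMaskOf ([] : List Char).reverse = 0 from rfl] at ih0
        exact ih0
      · have hne : cur.isEmpty = false := by simpa using hc
        rw [hne] at hgo
        simp only [Bool.false_eq_true, if_false] at hgo
        rw [List.foldl_cons, hstep, hgo, split₀_go_acc rest [] [cur.reverse]]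
        simp only [List.reverse_cons, List.reverse_nil, List.nil_append, List.countP_append]
        have ih0 : ∀ k : Int,
            (if (rest.foldl pvStep (k, 0)).2 == 31
             then (rest.foldl pvStep (k, 0)).1 + 1
             else (rest.foldl pvStep (k, 0)).1)
            = k + (((PySem.Chars.split₀.go rest [] []).countP pvPB : Nat) : Int) := by
          intro k
          have h := ih [] k
          rw [show pvMaskOf ([] : List Char).reverse = 0 from rfl] at h
          exact h
        rcases hp : ((pvMaskOf cur.reverse == 31) : Bool) with _ | _
        · simp only [Bool.false_eq_true, if_false]
          rw [ih0 count]
          have hp1 : pvPB cur.reverse = false := hp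
          simp [hp1]
        · simp only [if_pos]
          rw [ih0 (count + 1)]
          have hp1 : pvPB cur.reverse = true := hp
          simp only [List.countP_cons, List.countP_nil, hp1, if_pos]
          push_cast
          ring
    · have hs' : PySem.Chars.isspace c = false := by simpa using hs
      have hgo : PySem.Chars.split₀.go (c :: rest) cur [] =
          PySem.Chars.split₀.go rest (c :: cur) [] := by
        simp only [PySem.Chars.split₀.go, hs', Bool.false_eq_true, if_false]
      have hstep : pvStep (count, pvMaskOf cur.reverse) c =
          (count, pvMaskOf cur.reverse ||| pvBitOf c) := by
        simp [pvStep, hs']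
      have hm : pvMaskOf cur.reverse ||| pvBitOf c = pvMaskOf (c :: cur).reverse := by
        simp only [List.reverse_cons, pvMaskOf, List.foldl_append, List.foldl_cons,
          List.foldl_nil]
      rw [List.foldl_cons, hstep, hm, hgo]
      exact ih (c :: cur) count

-- the per-line automaton counts the all-vowel words of split₀
theorem pvLineCount_eq (count : Int) (line : String) :
    pvLineCount count line
      = count + (((PySem.Str.split₀ line).countP pvCondA : Nat) : Int) := by
  unfold pvLineCount
  show (if (line.toList.foldl pvStep (count, 0)).2 == 31
        then (line.toList.foldl pvStep (count, 0)).1 + 1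
        else (line.toList.foldl pvStep (count, 0)).1) = _
  have hmz : (0 : Nat) = pvMaskOf (([] : List Char)).reverse := rfl
  rw [hmz, scan_eq line.toList [] count]
  congr 2
  show (PySem.Chars.split₀.go line.toList [] []).countP pvPB
      = (PySem.Str.split₀ line).countP pvCondA
  unfold PySem.Str.split₀ PySem.Chars.split₀
  rw [List.countP_map]
  apply List.countP_congr
  intro w _
  rw [show (pvCondA ∘ String.ofList) w = pvCondA (String.ofList w) from rfl,
    pvCondA_eq_pvPB]
  simp

-- A's nested fold also counts the all-vowel words of the lines' split₀s
theorem a_foldl_counts (read_file : List String) (acc : Int) :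
    read_file.foldl (fun count line =>
      let words := PySem.Str.split₀ line
      words.foldl (fun count word =>
        if pvCondA word then count + 1 else count) count) acc
      = acc + (((read_file.flatMap (fun line => PySem.Str.split₀ line)).countP pvCondA : Nat) : Int) := by
  induction read_file generalizing acc with
  | nil => simp
  | cons line rest ih =>
    simp only [List.foldl_cons, List.flatMap_cons, List.countP_append]
    rw [ih]
    have hws : ∀ (ws : List String) (a : Int),
        ws.foldl (fun count word => if pvCondA word then count + 1 else count) a
          = a + ((ws.countP pvCondA : Nat) : Int) := by
      intro ws
      induction ws with
      | nil => simp
      | cons w rest' ih' =>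
        intro a
        simp only [List.foldl_cons, List.countP_cons, ih']
        rcases h : pvCondA w with _ | _
        · simp [h]
        · simp [h]
          ring
    rw [hws]
    push_cast
    ring

-- B's line fold equals the same flatMap count
theorem b_foldl_counts (read_file : List String) (acc : Int) :
    read_file.foldl pvLineCount acc
      = acc + (((read_file.flatMap (fun line => PySem.Str.split₀ line)).countP pvCondA : Nat) : Int) := by
  induction read_file generalizing acc with
  | nil => simp
  | cons line rest ih =>
    simp only [List.foldl_cons, List.flatMap_cons, List.countP_append]
    rw [pvLineCount_eq, ih]
    push_cast
    ring

-- ===== VERDICT (by name: the statement is the Claim_ definition above) =====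
theorem all_vowels_counter_spec : Claim_equal_all_vowels_counter := by
  intro read_file _
  unfold Spec_all_vowels_counter all_vowels_counter all_vowels_counter_alt
  rw [b_foldl_counts]
  rw [show (fun (count : Int) (line : String) =>
      let words := PySem.Str.split₀ line
      words.foldl (fun count word =>
        if ((PySem.Str.isIn "e" word || PySem.Str.isIn "E" word) &&
            (PySem.Str.isIn "a" word || PySem.Str.isIn "A" word) &&
            (PySem.Str.isIn "i" word || PySem.Str.isIn "I" word) &&
            (PySem.Str.isIn "o" word || PySem.Str.isIn "O" word) &&
            (PySem.Str.isIn "u" word || PySem.Str.isIn "U" word)) then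
          count + 1
        else count) count)
    = (fun (count : Int) (line : String) =>
        let words := PySem.Str.split₀ line
        words.foldl (fun count word => if pvCondA word then count + 1 else count) count) from rfl]
  rw [a_foldl_counts]
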